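-- pv_equiv track=rewrite | github.com/acwang8880/iou-finder | iou/helpers.py | match_vals_to_keys
-- ===== SOURCE A (Python) =====
-- from typing import Iterable, List, Mapping, Optional, Set
--
-- def match_vals_to_keys(values: Iterable, lookup_dict: Mapping) -> Set:
--     matched_keys = set()
--     while values:
--         element = values.pop(0)
--         for person, owned_values in lookup_dict.items():
--             if element in owned_values:
--                 matched_keys.add(person)
--                 break
--     return matched_keys
-- ===== SOURCE B (Python) =====
-- def match_vals_to_keys(values, lookup_dict):
--     # Build a reverse index value -> first owner (dict order, first owner wins),
--     # then one hash lookup per input value instead of scanning every person's list.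
--     owner = {}
--     for person, owned_values in lookup_dict.items():
--         for v in owned_values:
--             owner.setdefault(v, person)
--     matched_keys = set()
--     while values:  # same in-place consumption of `values` as the original
--         element = values.pop(0)
--         if element in owner:
--             matched_keys.add(owner[element])
--     return matched_keys
-- ===== Notes on version B (the rewrite author's own statement) =====
-- stated objective: faster
-- what changed: Replaces the per-value scan over every person's owned list with a reverse value-to-first-owner index built once, so each value is matched by a single dict lookup.
import Mathlib
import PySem

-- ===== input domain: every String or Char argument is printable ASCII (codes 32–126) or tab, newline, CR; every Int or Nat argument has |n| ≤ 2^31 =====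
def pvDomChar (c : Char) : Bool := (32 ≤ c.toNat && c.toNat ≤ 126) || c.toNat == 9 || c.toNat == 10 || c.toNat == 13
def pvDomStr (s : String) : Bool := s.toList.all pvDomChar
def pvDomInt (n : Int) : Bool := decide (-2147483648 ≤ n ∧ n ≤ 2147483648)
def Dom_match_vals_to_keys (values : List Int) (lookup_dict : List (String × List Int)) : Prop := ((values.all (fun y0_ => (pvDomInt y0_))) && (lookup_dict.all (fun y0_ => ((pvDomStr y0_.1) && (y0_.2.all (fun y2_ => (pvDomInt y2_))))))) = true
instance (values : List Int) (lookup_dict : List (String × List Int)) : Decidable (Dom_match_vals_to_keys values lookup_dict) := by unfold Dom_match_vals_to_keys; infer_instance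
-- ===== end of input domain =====

-- B replaces A's per-value scan of every person's list with a value→first-owner index built once
-- (asymptotically faster); return-value equivalence only — both consume `values` in place in Python.


-- ===== PORT A =====
-- inner `for person, owned_values in lookup_dict.items(): if element in owned_values: add; break`
def aScan (element : Int) : List (String × List Int) → PySem.Set String → PySem.Set String
  | [], matched => matched
  | (person, owned) :: rest, matched =>
      if owned.contains element then PySem.Set.add matched person
      else aScan element rest matched

def match_vals_to_keys (values : List Int) (lookup_dict : List (String × List Int)) : List String :=
  -- `while values: element = values.pop(0); …` consumes the list front to back
  values.foldl (fun matched element => aScan element lookup_dict matched) PySem.Set.empty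

-- ===== PORT B =====
-- `owner.setdefault(v, person)` over every (person, owned_values) pair
def buildOwner (lookup_dict : List (String × List Int)) : PySem.Dict Int String :=
  lookup_dict.foldl (fun d p => p.2.foldl (fun d v => d.setdefault v p.1) d) PySem.Dict.empty

def match_vals_to_keys_alt (values : List Int) (lookup_dict : List (String × List Int)) : List String :=
  let owner := buildOwner lookup_dict
  -- `if element in owner: matched_keys.add(owner[element])` (guarded lookup = get?)
  values.foldl (fun matched element =>
    match owner.get? element with
    | some person => PySem.Set.add matched person
    | none => matched) PySem.Set.empty

-- ===== PRECONDITION & SPEC =====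
def Spec_match_vals_to_keys (values : List Int) (lookup_dict : List (String × List Int)) (out : List String) : Prop := out = match_vals_to_keys_alt values lookup_dict
instance (values : List Int) (lookup_dict : List (String × List Int)) (out : List String) : Decidable (Spec_match_vals_to_keys values lookup_dict out) := by unfold Spec_match_vals_to_keys; infer_instance

-- ===== CLAIM (what is proved, stated in full; the proofs are below) =====
def Claim_equal_match_vals_to_keys : Prop := ∀ (values : List Int) (lookup_dict : List (String × List Int)), Dom_match_vals_to_keys values lookup_dict → Spec_match_vals_to_keys values lookup_dict (match_vals_to_keys values lookup_dict)

-- ===== LEMMAS AND PROOFS =====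

-- proof-only characterisation of A's inner scan: the first owner of `e` in dict order
def scanOwner (e : Int) : List (String × List Int) → Option String
  | [] => none
  | (p, owned) :: rest => if owned.contains e then some p else scanOwner e rest

theorem get?_setdefault_fold (e : Int) (p : String) :
    ∀ (owned : List Int) (d : PySem.Dict Int String),
    (owned.foldl (fun d v => d.setdefault v p) d).get? e =
      (match d.get? e with
       | some q => some q
       | none => if owned.contains e then some p else none) := by
  intro owned
  induction owned with
  | nil => intro d; rcases h : d.get? e <;> simp [h]
  | cons v rest ih =>
    intro d
    simp only [List.foldl_cons, ih]
    by_cases hc : d.contains v = true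
    · rw [PySem.Dict.setdefault_of_contains _ _ hc]
      rcases h : d.get? e with _ | q
      · have hv : e ≠ v := by
          intro hev; subst hev
          rw [PySem.Dict.contains_eq_isSome_get?, h] at hc
          simp at hc
        simp [hv]
      · simp
    · rw [PySem.Dict.setdefault_of_not_contains _ _ (by simpa using hc)]
      rw [PySem.Dict.get?_insert]
      by_cases hev : e = v
      · subst hev
        have h : d.get? e = none := by
          rw [PySem.Dict.contains_eq_isSome_get?] at hc
          rcases h : d.get? e <;> simp [h] at hc ⊢
        simp [h]
      · rcases h : d.get? e with _ | q
        · simp [hev]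
        · simp [hev]

theorem get?_buildOwner_fold (e : Int) :
    ∀ (L : List (String × List Int)) (d : PySem.Dict Int String),
    (L.foldl (fun d p => p.2.foldl (fun d v => d.setdefault v p.1) d) d).get? e =
      (match d.get? e with
       | some q => some q
       | none => scanOwner e L) := by
  intro L
  induction L with
  | nil => intro d; rcases h : d.get? e <;> simp [h, scanOwner]
  | cons pr rest ih =>
    intro d
    obtain ⟨p, owned⟩ := pr
    simp only [List.foldl_cons, ih, get?_setdefault_fold]
    rcases h : d.get? e with _ | q
    · by_cases hm : e ∈ owned <;> simp [scanOwner, hm]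
    · simp

theorem get?_buildOwner (e : Int) (L : List (String × List Int)) :
    (buildOwner L).get? e = scanOwner e L := by
  unfold buildOwner
  rw [get?_buildOwner_fold]
  simp [PySem.Dict.get?_empty]

theorem aScan_eq_scanOwner (e : Int) :
    ∀ (L : List (String × List Int)) (matched : PySem.Set String),
    aScan e L matched =
      (match scanOwner e L with
       | some p => PySem.Set.add matched p
       | none => matched) := by
  intro L
  induction L with
  | nil => intro matched; simp [aScan, scanOwner]
  | cons pr rest ih =>
    intro matched
    obtain ⟨p, owned⟩ := pr
    simp only [aScan, scanOwner]
    split <;> simp [ih]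

-- ===== VERDICT (by name: the statement is the Claim_ definition above) =====
theorem match_vals_to_keys_spec : Claim_equal_match_vals_to_keys := by
  intro values lookup_dict _
  unfold Spec_match_vals_to_keys match_vals_to_keys match_vals_to_keys_alt
  apply PySem.List.foldl_congr_mem
  intro matched e _
  rw [aScan_eq_scanOwner, get?_buildOwner]
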